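-- pv_equiv track=rewrite | github.com/mehdimunim/Helix-Analysis-Program | coding by ourselves/DSSP/patterns.py | find_nturns
-- ===== SOURCE A (Python) =====
-- def find_nturns(hbond):
--     """
--     Finds the beginnings of the n-turns with n in {3, 4, 5} with the list of H-bonds
--     n-turns are H-bonds form CO(i) to NH(i+n)
--     """
--     n_res = len(hbond)
--     nturn_starts = {
--         "3-turn": [],
--         # [1, 8] means there are two n-turns  (1, 1 + n) and (8, 8 +n)
--         "4-turn": [],
--         "5-turn": []
--     }
--
--     # iterating over atoms indexes i and their corresponding neighbors j
--     i = 0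
--     while i < n_res:
--
--         # Calculating the gap between H-bond neighbors
--         n = hbond[i][1] - hbond[i][0]
--
--         if (n >= 3 and n <= 5):
--             name = str(n) + "-turn"
--             # Adding the beginning of the n-turn to the corresponding list
--             nturn_starts[name].append(hbond[i][0])
--         i += 1
--
--     return nturn_starts
-- ===== SOURCE B (Python) =====
-- def find_nturns(hbond):
--     """Same classification, but as three independent filtering passes (different decomposition)."""
--     return {
--         "3-turn": [h[0] for h in hbond if h[1] - h[0] == 3],
--         "4-turn": [h[0] for h in hbond if h[1] - h[0] == 4],
--         "5-turn": [h[0] for h in hbond if h[1] - h[0] == 5],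
--     }
-- ===== Notes on version B (the rewrite author's own statement) =====
-- stated objective: simpler
-- what changed: Replaces the index-while loop that computes each gap, builds a string key and mutates the matching dict bucket with a returned dict literal of three independent filtering comprehensions, one per exact gap.
import Mathlib
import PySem

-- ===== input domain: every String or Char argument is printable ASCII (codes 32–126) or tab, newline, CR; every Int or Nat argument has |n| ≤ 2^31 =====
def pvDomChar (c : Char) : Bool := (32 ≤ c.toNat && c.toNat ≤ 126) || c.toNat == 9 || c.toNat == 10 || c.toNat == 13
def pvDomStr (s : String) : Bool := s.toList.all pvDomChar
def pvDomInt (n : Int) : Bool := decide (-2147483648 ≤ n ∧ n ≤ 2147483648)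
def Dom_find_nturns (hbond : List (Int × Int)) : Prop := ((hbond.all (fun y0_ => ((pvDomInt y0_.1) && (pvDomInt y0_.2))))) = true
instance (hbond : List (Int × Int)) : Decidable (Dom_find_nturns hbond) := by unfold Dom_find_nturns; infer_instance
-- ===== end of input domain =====

-- B replaces A's single bucketing loop (gap, string key, dict mutation) by a dict literal of
-- three independent filtering passes, one per exact gap; same values, no speed claim.

-- ===== PORT A =====
-- the dict with its three fixed keys, initialised to empty lists
def pvInitDict : PySem.Dict String (List Int) :=
  ((PySem.Dict.empty.insert "3-turn" []).insert "4-turn" []).insert "5-turn" []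

-- while-loop body: n = hbond[i][1] - hbond[i][0]; if 3 <= n <= 5: d[str(n)+"-turn"].append(hbond[i][0])
def pvStepA (d : PySem.Dict String (List Int)) (h : Int × Int) : PySem.Dict String (List Int) :=
  let n := h.2 - h.1
  if 3 ≤ n ∧ n ≤ 5 then
    d.modify (PySem.Int.toStr n ++ "-turn") [] (fun l => l ++ [h.1])
  else d

def find_nturns (hbond : List (Int × Int)) : List (String × List Int) :=
  (hbond.foldl pvStepA pvInitDict).items

-- ===== PORT B =====
def find_nturns_alt (hbond : List (Int × Int)) : List (String × List Int) :=
  [("3-turn", (hbond.filter (fun h => h.2 - h.1 == 3)).map (·.1)),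
   ("4-turn", (hbond.filter (fun h => h.2 - h.1 == 4)).map (·.1)),
   ("5-turn", (hbond.filter (fun h => h.2 - h.1 == 5)).map (·.1))]

-- ===== PRECONDITION & SPEC =====
def Spec_find_nturns (hbond : List (Int × Int)) (out : List (String × List Int)) : Prop := out = find_nturns_alt hbond
instance (hbond : List (Int × Int)) (out : List (String × List Int)) : Decidable (Spec_find_nturns hbond out) := by unfold Spec_find_nturns; infer_instance

-- ===== CLAIM (what is proved, stated in full; the proofs are below) =====
def Claim_equal_find_nturns : Prop := ∀ (hbond : List (Int × Int)), Dom_find_nturns hbond → Spec_find_nturns hbond (find_nturns hbond)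

-- ===== LEMMAS AND PROOFS =====

-- the dict state A's loop maintains: always the three fixed keys, in insertion order
def pvMkD (l3 l4 l5 : List Int) : PySem.Dict String (List Int) :=
  ((PySem.Dict.empty.insert "3-turn" l3).insert "4-turn" l4).insert "5-turn" l5

theorem pvMkD_modify3 (l3 l4 l5 : List Int) (x : Int) :
    (pvMkD l3 l4 l5).modify "3-turn" [] (fun l => l ++ [x]) = pvMkD (l3 ++ [x]) l4 l5 := by
  simp [pvMkD, PySem.Dict.modify, PySem.Dict.insert, PySem.Dict.empty, PySem.Dict.getD,
    PySem.Dict.get?, PySem.Dict.contains]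

theorem pvMkD_modify4 (l3 l4 l5 : List Int) (x : Int) :
    (pvMkD l3 l4 l5).modify "4-turn" [] (fun l => l ++ [x]) = pvMkD l3 (l4 ++ [x]) l5 := by
  simp [pvMkD, PySem.Dict.modify, PySem.Dict.insert, PySem.Dict.empty, PySem.Dict.getD,
    PySem.Dict.get?, PySem.Dict.contains]

theorem pvMkD_modify5 (l3 l4 l5 : List Int) (x : Int) :
    (pvMkD l3 l4 l5).modify "5-turn" [] (fun l => l ++ [x]) = pvMkD l3 l4 (l5 ++ [x]) := by
  simp [pvMkD, PySem.Dict.modify, PySem.Dict.insert, PySem.Dict.empty, PySem.Dict.getD,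
    PySem.Dict.get?, PySem.Dict.contains]

theorem pvMkD_items (l3 l4 l5 : List Int) :
    (pvMkD l3 l4 l5).items = [("3-turn", l3), ("4-turn", l4), ("5-turn", l5)] := by
  simp [pvMkD, PySem.Dict.insert, PySem.Dict.empty, PySem.Dict.contains]

-- loop invariant of A's while-loop, stated over the B-side filters
theorem pvLoop (hbond : List (Int × Int)) : ∀ (l3 l4 l5 : List Int),
    hbond.foldl pvStepA (pvMkD l3 l4 l5) =
      pvMkD (l3 ++ (hbond.filter (fun h => h.2 - h.1 == 3)).map (·.1))
            (l4 ++ (hbond.filter (fun h => h.2 - h.1 == 4)).map (·.1))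
            (l5 ++ (hbond.filter (fun h => h.2 - h.1 == 5)).map (·.1)) := by
  induction hbond with
  | nil => simp
  | cons h t ih =>
    intro l3 l4 l5
    have key : pvStepA (pvMkD l3 l4 l5) h =
        pvMkD (l3 ++ if h.2 - h.1 == 3 then [h.1] else [])
              (l4 ++ if h.2 - h.1 == 4 then [h.1] else [])
              (l5 ++ if h.2 - h.1 == 5 then [h.1] else []) := by
      unfold pvStepA
      by_cases h3 : h.2 - h.1 = 3
      · simpa [h3, PySem.Int.toStr] using pvMkD_modify3 l3 l4 l5 h.1
      · by_cases h4 : h.2 - h.1 = 4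
        · simpa [h4, PySem.Int.toStr] using pvMkD_modify4 l3 l4 l5 h.1
        · by_cases h5 : h.2 - h.1 = 5
          · simpa [h5, PySem.Int.toStr] using pvMkD_modify5 l3 l4 l5 h.1
          · have hn : ¬ (3 ≤ h.2 - h.1 ∧ h.2 - h.1 ≤ 5) := by omega
            rw [if_neg hn]
            simp [h3, h4, h5]
    rw [List.foldl_cons, key, ih]
    by_cases h3 : h.2 - h.1 = 3 <;> by_cases h4 : h.2 - h.1 = 4 <;>
      by_cases h5 : h.2 - h.1 = 5 <;> simp [h3, h4, h5]

-- ===== VERDICT (by name: the statement is the Claim_ definition above) =====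
theorem find_nturns_spec : Claim_equal_find_nturns := by
  intro hbond _
  show find_nturns hbond = find_nturns_alt hbond
  have h0 : pvInitDict = pvMkD [] [] [] := rfl
  unfold find_nturns find_nturns_alt
  rw [h0, pvLoop, pvMkD_items]
  simp
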